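-- pv_equiv track=rewrite | github.com/Edmonton-Public-Library/notices | page.py | __split__
-- ===== SOURCE A (Python) =====
-- def __split__(sentence:str):
--     words    = sentence.split()
--     start    = 0
--     end      = 0
--     spcWords = []
--     for word in words:
--         end = sentence.find(word, start) + len(word)
--         spcWords.append(sentence[start:end])
--         start = end
--     return spcWords
-- ===== SOURCE B (Python) =====
-- def __split__(sentence: str):
--     # Two-pointer single scan: advance over whitespace, then over the word,
--     # and emit the segment [previous end : word end) directly -- no split()/find().
--     res = []
--     j, n = 0, len(sentence)
--     while True:
--         k = j
--         while k < n and sentence[k].isspace():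
--             k += 1
--         if k == n:
--             return res
--         m = k + 1
--         while m < n and not sentence[m].isspace():
--             m += 1
--         res.append(sentence[j:m])
--         j = m
-- ===== Notes on version B (the rewrite author's own statement) =====
-- stated objective: alternative
-- what changed: Replaced split() plus a repeated find() lookup per word with a single two-pointer character scan that emits each segment (leading whitespace + word) directly.
import Mathlib
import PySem

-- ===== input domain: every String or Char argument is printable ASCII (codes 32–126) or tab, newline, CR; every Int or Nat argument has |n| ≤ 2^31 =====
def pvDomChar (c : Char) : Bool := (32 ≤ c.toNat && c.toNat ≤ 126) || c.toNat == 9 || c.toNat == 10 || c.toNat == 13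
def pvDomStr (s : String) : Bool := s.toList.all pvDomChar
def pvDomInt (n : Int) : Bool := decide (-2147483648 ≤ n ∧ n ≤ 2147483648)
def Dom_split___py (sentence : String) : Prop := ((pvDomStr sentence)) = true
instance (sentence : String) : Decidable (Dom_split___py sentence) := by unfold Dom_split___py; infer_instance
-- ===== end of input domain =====

-- B replaces A's split()+repeated find() re-scans by one two-pointer pass; return value only (neither mutates).

-- ===== PORT A =====
-- A: words = sentence.split(); for each word: end = sentence.find(word, start)+len(word);
--    append sentence[start:end]; start = end.  (foldl over the words with state (start, spcWords))
def split___py (sentence : String) : List String :=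
  let s := sentence.toList
  let words := PySem.Chars.split₀ s
  ((words.foldl (fun (st : Int × List (List Char)) word =>
      let e := PySem.Chars.findFrom s word st.1 none + (word.length : Int)
      (e, st.2 ++ [PySem.Chars.slice s (some st.1) (some e)])) ((0 : Int), [])).2).map String.mk

-- ===== PORT B =====
def pvWordChar (c : Char) : Bool := !PySem.Chars.isspace c

-- termination measure fact cited by the recursions below
theorem pvDropDrop_lt (s : List Char) (h : ¬ s.dropWhile PySem.Chars.isspace = []) :
    ((s.dropWhile PySem.Chars.isspace).dropWhile pvWordChar).length < s.length := by
  rcases hr : s.dropWhile PySem.Chars.isspace with _ | ⟨c, r'⟩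
  · exact absurd hr h
  · have hc : pvWordChar c = true := by
      have := List.head_dropWhile_not (p := PySem.Chars.isspace) (l := s) (by simp [hr])
      simp only [hr, List.head_cons] at this
      simp [pvWordChar, this]
    have h2 : (s.dropWhile PySem.Chars.isspace).length ≤ s.length :=
      List.length_dropWhile_le (p := PySem.Chars.isspace) (l := s)
    have h3 := List.length_dropWhile_le (p := pvWordChar) (l := r')
    rw [List.dropWhile_cons_of_pos hc]
    simp [hr] at h2
    omega

-- B's scan from position j (the argument is the suffix of the sentence from j):
-- the first inner while loop (skip whitespace to k) is the dropWhile/takeWhile scan,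
-- the second (scan the word to m) is takeWhile of the non-space chars,
-- res.append(sentence[j:m]) emits the skipped whitespace ++ the word, and j = m recurses on the rest.
def pvAltGo (s : List Char) : List (List Char) :=
  let r := s.dropWhile PySem.Chars.isspace
  if h : r = [] then []
  else
    (s.takeWhile PySem.Chars.isspace ++ r.takeWhile pvWordChar) :: pvAltGo (r.dropWhile pvWordChar)
termination_by s.length
decreasing_by exact pvDropDrop_lt s h

def split___py_alt (sentence : String) : List String :=
  (pvAltGo sentence.toList).map String.mk

-- ===== PRECONDITION & SPEC =====
def Spec_split___py (sentence : String) (out : List String) : Prop := out = split___py_alt sentence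
instance (sentence : String) (out : List String) : Decidable (Spec_split___py sentence out) := by unfold Spec_split___py; infer_instance

-- ===== CLAIM (what is proved, stated in full; the proofs are below) =====
def Claim_equal_split___py : Prop := ∀ (sentence : String), Dom_split___py sentence → Spec_split___py sentence (split___py sentence)

-- ===== LEMMAS AND PROOFS =====

-- reference chunking: the words of s (no whitespace attached), in order
def pvSp (s : List Char) : List (List Char) :=
  let r := s.dropWhile PySem.Chars.isspace
  if h : r = [] then []
  else r.takeWhile pvWordChar :: pvSp (r.dropWhile pvWordChar)
termination_by s.length
decreasing_by exact pvDropDrop_lt s h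

theorem pvSp_nil_of (s : List Char) (h : s.dropWhile PySem.Chars.isspace = []) : pvSp s = [] := by
  rw [pvSp]; simp [h]

theorem pvSp_cons_of (s : List Char) (h : ¬ s.dropWhile PySem.Chars.isspace = []) :
    pvSp s = (s.dropWhile PySem.Chars.isspace).takeWhile pvWordChar ::
      pvSp ((s.dropWhile PySem.Chars.isspace).dropWhile pvWordChar) := by
  rw [pvSp]; simp [h]

theorem pvAltGo_nil_of (s : List Char) (h : s.dropWhile PySem.Chars.isspace = []) : pvAltGo s = [] := by
  rw [pvAltGo]; simp [h]

theorem pvAltGo_cons_of (s : List Char) (h : ¬ s.dropWhile PySem.Chars.isspace = []) :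
    pvAltGo s = (s.takeWhile PySem.Chars.isspace ++ (s.dropWhile PySem.Chars.isspace).takeWhile pvWordChar) ::
      pvAltGo ((s.dropWhile PySem.Chars.isspace).dropWhile pvWordChar) := by
  rw [pvAltGo]; simp [h]

theorem pvSp_cons_space (c : Char) (rest : List Char) (h : PySem.Chars.isspace c = true) :
    pvSp (c :: rest) = pvSp rest := by
  by_cases hd : rest.dropWhile PySem.Chars.isspace = []
  · rw [pvSp_nil_of _ (by rw [List.dropWhile_cons_of_pos h]; exact hd), pvSp_nil_of _ hd]
  · rw [pvSp_cons_of _ (by rw [List.dropWhile_cons_of_pos h]; simpa using hd),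
        pvSp_cons_of _ hd, List.dropWhile_cons_of_pos h]

-- split₀'s accumulator loop, characterised: cur is the reversed word in progress, acc the reversed output
theorem pvGoEq (s : List Char) : ∀ (cur : List Char) (acc : List (List Char)),
    PySem.Chars.split₀.go s cur acc =
      acc.reverse ++ (if cur = [] then pvSp s
        else (cur.reverse ++ s.takeWhile pvWordChar) :: pvSp (s.dropWhile pvWordChar)) := by
  induction s with
  | nil =>
    intro cur acc
    rw [PySem.Chars.split₀.go]
    by_cases hc : cur = [] <;>
      simp [hc, pvSp_nil_of [] rfl]
  | cons c rest ih =>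
    intro cur acc
    rw [PySem.Chars.split₀.go]
    by_cases hsp : PySem.Chars.isspace c = true
    · have hwc : pvWordChar c = false := by simp [pvWordChar, hsp]
      by_cases hc : cur = []
      · simp [hsp, hc, ih, pvSp_cons_space c rest hsp]
      · simp [hsp, hc, ih, pvSp_cons_space c rest hsp, List.takeWhile_cons, List.dropWhile_cons, hwc]
    · have hsp' : PySem.Chars.isspace c = false := by simpa using hsp
      have hwc : pvWordChar c = true := by simp [pvWordChar, hsp']
      simp only [hsp', Bool.false_eq_true, if_false, ih]
      by_cases hc : cur = []
      · have h1 : ¬ (c :: rest).dropWhile PySem.Chars.isspace = [] := by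
          simp [List.dropWhile_cons, hsp']
        rw [pvSp_cons_of _ h1]
        simp [hc, List.dropWhile_cons, List.takeWhile_cons, hsp', hwc]
      · simp [hc, List.takeWhile_cons, List.dropWhile_cons, hwc]

theorem pvSplit₀_eq (s : List Char) : PySem.Chars.split₀ s = pvSp s := by
  rw [PySem.Chars.split₀, pvGoEq]
  simp

-- find.go walks over the all-whitespace gap and stops exactly at the word
theorem pvFindGoAux (c0 : Char) (w' t : List Char) (hc0 : PySem.Chars.isspace c0 = false) :
    ∀ (ws : List Char) (k : Nat), (∀ c ∈ ws, PySem.Chars.isspace c = true) →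
      PySem.Chars.find.go (c0 :: w') (ws ++ ((c0 :: w') ++ t)) k = (k : Int) + ws.length := by
  intro ws
  induction ws with
  | nil =>
    intro k _
    rw [List.nil_append, List.cons_append, PySem.Chars.find.go]
    have hpre : (c0 :: w').isPrefixOf (c0 :: (w' ++ t)) = true := by
      simp [List.isPrefixOf_iff_prefix]
    simp [hpre]
  | cons c ws' ih =>
    intro k h
    have hc : PySem.Chars.isspace c = true := h c List.mem_cons_self
    have hne : (c0 == c) = false := by
      by_cases hcc : c0 = c
      · rw [hcc] at hc0; rw [hc0] at hc; exact absurd hc (by simp)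
      · simp [hcc]
    rw [List.cons_append, PySem.Chars.find.go]
    have hpre : (c0 :: w').isPrefixOf (c :: (ws' ++ ((c0 :: w') ++ t))) = false := by
      simp [List.isPrefixOf, hne]
    rw [hpre]
    simp only [Bool.false_eq_true, if_false]
    rw [ih (k + 1) (fun c hm => h c (List.mem_cons_of_mem _ hm))]
    simp only [List.length_cons]
    push_cast
    omega

theorem pvFind (ws : List Char) (c0 : Char) (w' t : List Char)
    (hws : ∀ c ∈ ws, PySem.Chars.isspace c = true) (hc0 : PySem.Chars.isspace c0 = false) :
    PySem.Chars.find (ws ++ ((c0 :: w') ++ t)) (c0 :: w') = (ws.length : Int) := by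
  rw [PySem.Chars.find]
  rw [pvFindGoAux c0 w' t hc0 ws 0 hws]
  simp

-- loop invariant for A's fold: with start = |pre| and the remaining words = pvSp s
-- (pre ++ s being the whole sentence), the fold appends exactly pvAltGo s to the accumulator.
theorem pvInv : ∀ (n : Nat) (s : List Char), s.length ≤ n → ∀ (pre : List Char) (acc : List (List Char)),
    ((pvSp s).foldl (fun (st : Int × List (List Char)) word =>
        let e := PySem.Chars.findFrom (pre ++ s) word st.1 none + (word.length : Int)
        (e, st.2 ++ [PySem.Chars.slice (pre ++ s) (some st.1) (some e)]))
      ((pre.length : Int), acc)).2 = acc ++ pvAltGo s := by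
  intro n
  induction n with
  | zero =>
    intro s hs pre acc
    have : s = [] := List.length_eq_zero_iff.mp (Nat.le_zero.mp hs)
    subst this
    rw [pvSp_nil_of [] rfl, pvAltGo_nil_of [] rfl]
    simp
  | succ n ih =>
    intro s hs pre acc
    by_cases h : s.dropWhile PySem.Chars.isspace = []
    · rw [pvSp_nil_of s h, pvAltGo_nil_of s h]
      simp
    · rcases hr : s.dropWhile PySem.Chars.isspace with _ | ⟨c, r'⟩
      · exact absurd hr h
      · have hc : pvWordChar c = true := by
          have := List.head_dropWhile_not (p := PySem.Chars.isspace) (l := s) (by simp [hr])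
          simp only [hr, List.head_cons] at this
          simp [pvWordChar, this]
        have hcsp : PySem.Chars.isspace c = false := by simpa [pvWordChar] using hc
        set ws := s.takeWhile PySem.Chars.isspace with hws_def
        set w := (c :: r').takeWhile pvWordChar with hw_def
        set t := (c :: r').dropWhile pvWordChar with ht_def
        have hw_cons : w = c :: r'.takeWhile pvWordChar := by
          rw [hw_def, List.takeWhile_cons_of_pos hc]
        have hwt : w ++ t = c :: r' := List.takeWhile_append_dropWhile
        have hs_split : s = ws ++ (w ++ t) := by
          have h1 : ws ++ s.dropWhile PySem.Chars.isspace = s := List.takeWhile_append_dropWhile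
          rw [hr, ← hwt] at h1
          exact h1.symm
        have hws_space : ∀ x ∈ ws, PySem.Chars.isspace x = true :=
          fun x hm => List.mem_takeWhile_imp hm
        have hlt : t.length < s.length := by
          have := pvDropDrop_lt s h
          rw [hr] at this
          exact this
        have ht : t.length ≤ n := by omega
        rw [pvSp_cons_of s h, pvAltGo_cons_of s h, hr]
        simp only [List.foldl_cons]
        -- the find() call: the gap before the word is all whitespace, so it stops at the word
        have hfind : PySem.Chars.find ((pre ++ s).drop pre.length) w = (ws.length : Int) := by
          rw [List.drop_left]
          calc PySem.Chars.find s w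
              = PySem.Chars.find (ws ++ (w ++ t)) w := by rw [← hs_split]
            _ = (ws.length : Int) := by
                rw [hw_cons]
                exact pvFind ws c (r'.takeWhile pvWordChar) t hws_space hcsp
        have hklen : pre.length ≤ (pre ++ s).length := by simp
        have hff : PySem.Chars.findFrom (pre ++ s) w ((pre.length : Nat) : Int) none
            = (pre.length : Int) + ws.length := by
          rw [PySem.Chars.findFrom_natCast _ _ _ hklen, hfind]
          have hne : ((ws.length : Nat) : Int) ≠ -1 := by omega
          simp [hne]
        have hcast : (pre.length : Int) + (ws.length : Int) + (w.length : Int)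
            = ((pre.length + (ws.length + w.length) : Nat) : Int) := by push_cast; ring
        have hslice : PySem.Chars.slice (pre ++ s) (some ((pre.length : Nat) : Int))
            (some ((pre.length : Int) + ws.length + w.length)) = ws ++ w := by
          rw [hcast]
          rw [PySem.Chars.slice_eq_listSlice, PySem.List.slice_natCast]
          rw [List.drop_left, Nat.add_sub_cancel_left]
          rw [hs_split, List.take_length_add_append, List.take_left]
        rw [hff]
        rw [hslice]
        have hpre' : (((pre ++ ws ++ w).length : Nat) : Int)
            = (pre.length : Int) + ws.length + w.length := by
          simp [List.length_append]
          push_cast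
          ring
        have hsent : pre ++ s = (pre ++ ws ++ w) ++ t := by
          rw [hs_split]
          simp [List.append_assoc]
        rw [hsent, ← hpre']
        rw [ih t ht (pre ++ ws ++ w) (acc ++ [ws ++ w])]
        simp
        exact ⟨rfl, rfl⟩

-- ===== VERDICT (by name: the statement is the Claim_ definition above) =====
theorem split___py_spec : Claim_equal_split___py := by
  intro sentence _
  unfold Spec_split___py split___py split___py_alt
  simp only [pvSplit₀_eq]
  have h := pvInv sentence.toList.length sentence.toList le_rfl [] []
  simp only [List.nil_append, List.length_nil, Nat.cast_zero] at h
  rw [h]
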